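-- pv_equiv track=rewrite | github.com/NeuralMMO/baselines | curriculum_generation/elm.py | extract_task_fn
-- ===== SOURCE A (Python) =====
-- def extract_task_fn(result_str, fn_name):
--     """
--     Extracts the source code of a function from a given string.
--
--     Args:
--         result_str: The string from which the function is to be extracted.
--         fn_name: The name of the function to be extracted.
--
--     Returns:
--         The source code of the function as a string.
--     """
--     split = result_str.split("\n")
--     fn_str = []
--     for line in split[::-1]:
--       if line.startswith(f"def {fn_name}("):
--         fn_str.append(line)
--         break
--       fn_str.append(line)
--     return "\n".join(fn_str[::-1])
-- ===== SOURCE B (Python) =====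
-- def extract_task_fn(result_str, fn_name):
--     """
--     Extracts the source code of a function from a given string.
--
--     Substring search instead of line processing: the last line starting with
--     "def <fn_name>(" is the last occurrence of that header preceded by a
--     newline; rfind locates it and one slice returns the suffix.  If there is
--     no such occurrence the whole string is returned (which also covers a
--     header on the very first line, where A keeps the whole string too).
--     """
--     pos = result_str.rfind(f"\ndef {fn_name}(")
--     if pos == -1:
--         return result_str
--     return result_str[pos + 1:]
-- ===== Notes on version B (the rewrite author's own statement) =====
-- stated objective: alternative
-- what changed: Replaces A's split-into-lines plus reversed accumulate-until-match loop and double reversal by a direct substring search: rfind the last occurrence of "\ndef <fn_name>(" in the raw string and return the suffix after that newline (whole string if absent).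
-- outside the precondition, e.g. on extract_task_fn('a\ndef f\ng(x', 'f\ng'): A returns 'a\ndef f\ng(x', B returns 'def f\ng(x'
import Mathlib
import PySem

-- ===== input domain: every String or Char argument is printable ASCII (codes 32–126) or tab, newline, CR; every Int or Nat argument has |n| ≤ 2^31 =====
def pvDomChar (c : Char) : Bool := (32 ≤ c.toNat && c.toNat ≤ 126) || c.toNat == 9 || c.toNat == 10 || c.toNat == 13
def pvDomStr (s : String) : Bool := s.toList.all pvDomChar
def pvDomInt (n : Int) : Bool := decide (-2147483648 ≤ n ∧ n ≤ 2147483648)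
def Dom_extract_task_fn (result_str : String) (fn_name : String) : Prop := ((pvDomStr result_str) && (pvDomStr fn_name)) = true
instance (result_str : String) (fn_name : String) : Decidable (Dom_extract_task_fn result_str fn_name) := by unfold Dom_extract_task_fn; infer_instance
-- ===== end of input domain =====

-- B drops A's line processing entirely: instead of splitting into lines and scanning them
-- backwards with an accumulator, it rfind-s the last occurrence of "\ndef <fn_name>(" in the
-- raw string and returns the suffix after that newline; objective: alternative (same cost).

-- ===== PORT A =====
-- A's loop over split[::-1] with the break: recursion over the reversed list,
-- accumulating fn_str (append = acc ++ [l]); the matching branch appends and stops.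
def pvLoopA (pref : String) : List String → List String → List String
  | [], acc => acc
  | l :: ls, acc =>
      if PySem.Str.startswith l pref then acc ++ [l]
      else pvLoopA pref ls (acc ++ [l])

def extract_task_fn (result_str : String) (fn_name : String) : String :=
  -- result_str.split("\n"): sep is the nonempty literal "\n", so split? is some; getD is exact here
  let split := (PySem.Str.split? result_str "\n").getD []
  -- f"def {fn_name}(" as a concatenation
  let pref := PySem.Str.join "" ["def ", fn_name, "("]
  -- split[::-1] and fn_str[::-1] are list reversal
  PySem.Str.join "\n" (pvLoopA pref split.reverse []).reverse

-- ===== PORT B =====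
def extract_task_fn_alt (result_str : String) (fn_name : String) : String :=
  -- pos = result_str.rfind(f"\ndef {fn_name}(")
  let pos := PySem.Str.rfind result_str (PySem.Str.join "" ["\ndef ", fn_name, "("])
  if pos = -1 then result_str
  else PySem.Str.slice result_str (some (pos + 1)) none  -- result_str[pos + 1:]

-- ===== PRECONDITION & SPEC =====
-- Pre_ excludes only inputs whose fn_name contains a newline (never a function name) while
-- "\ndef <fn_name>(" actually occurs in result_str: there A's per-line startswith can never
-- match (it returns the whole string) while B's raw substring search finds it, and both
-- readings of this degenerate corner are defensible.
def Pre_extract_task_fn (result_str : String) (fn_name : String) : Prop :=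
  '\n' ∉ fn_name.toList
    ∨ PySem.Str.isIn (PySem.Str.join "" ["\ndef ", fn_name, "("]) result_str = false
instance (result_str : String) (fn_name : String) : Decidable (Pre_extract_task_fn result_str fn_name) := by unfold Pre_extract_task_fn; infer_instance

def pvWitness_extract_task_fn : String × String := ("x = 1\ndef f(y):\n  return y", "f")

def Spec_extract_task_fn (result_str : String) (fn_name : String) (out : String) : Prop := out = extract_task_fn_alt result_str fn_name
instance (result_str : String) (fn_name : String) (out : String) : Decidable (Spec_extract_task_fn result_str fn_name out) := by unfold Spec_extract_task_fn; infer_instance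

-- ===== CLAIM (what is proved, stated in full; the proofs are below) =====
def Claim_equal_extract_task_fn : Prop := ∀ (result_str : String) (fn_name : String), Dom_extract_task_fn result_str fn_name → Pre_extract_task_fn result_str fn_name → Spec_extract_task_fn result_str fn_name (extract_task_fn result_str fn_name)

-- ===== LEMMAS AND PROOFS =====

-- "take until the first match, inclusive": what A's broken-out-of loop collects (String level)
def pvTakeIncl (pref : String) : List String → List String
  | [] => []
  | l :: ls => if PySem.Str.startswith l pref then [l] else l :: pvTakeIncl pref ls

-- the same on code points
def pvTakeInclC (pref : List Char) : List (List Char) → List (List Char)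
  | [] => []
  | l :: ls => if pref.isPrefixOf l then [l] else l :: pvTakeInclC pref ls

-- the line decomposition of a string (split on '\n')
def pvLines : List Char → List (List Char)
  | [] => [[]]
  | c :: t => if c = '\n' then [] :: pvLines t else (pvLines t).modifyHead (c :: ·)

theorem pvLoopA_eq (pref : String) (xs acc : List String) :
    pvLoopA pref xs acc = acc ++ pvTakeIncl pref xs := by
  induction xs generalizing acc with
  | nil => simp [pvLoopA, pvTakeIncl]
  | cons l ls ih =>
      simp only [pvLoopA, pvTakeIncl]
      split_ifs with h
      · simp
      · rw [ih]; simp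

theorem pvTakeIncl_map (pref : String) (xs : List String) :
    (pvTakeIncl pref xs).map String.toList = pvTakeInclC pref.toList (xs.map String.toList) := by
  induction xs with
  | nil => simp [pvTakeIncl, pvTakeInclC]
  | cons l ls ih =>
      simp only [pvTakeIncl, pvTakeInclC, List.map_cons]
      rw [show PySem.Str.startswith l pref = pref.toList.isPrefixOf l.toList from by
        simp [PySem.Str.startswith_eq, PySem.Chars.startswith]]
      split_ifs with h <;> simp [ih]

theorem pvTakeInclC_append (p : List Char) (xs ys : List (List Char)) :
    pvTakeInclC p (xs ++ ys) =
      if xs.any (fun l => p.isPrefixOf l) then pvTakeInclC p xs else xs ++ pvTakeInclC p ys := by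
  induction xs with
  | nil => simp
  | cons l ls ih =>
      simp only [List.cons_append, pvTakeInclC, List.any_cons]
      by_cases h : p.isPrefixOf l = true
      · simp [h]
      · simp only [Bool.not_eq_true] at h
        simp [h, ih]
        split_ifs <;> simp_all

theorem pvLines_ne_nil (s : List Char) : pvLines s ≠ [] := by
  cases s with
  | nil => simp [pvLines]
  | cons c t =>
      simp only [pvLines]
      split_ifs <;> simp [List.modifyHead_eq_nil_iff, pvLines_ne_nil t]

theorem pvSplitOn_go_eq (fuel : Nat) (s cur : List Char) (acc : List (List Char))
    (h : s.length ≤ fuel) :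
    PySem.Chars.splitOn.go ['\n'] fuel s cur acc
      = acc.reverse ++ (pvLines s).modifyHead (cur.reverse ++ ·) := by
  induction fuel generalizing s cur acc with
  | zero =>
      have : s = [] := by cases s <;> simp_all
      subst this
      simp [PySem.Chars.splitOn.go, pvLines]
  | succ fuel ih =>
      cases s with
      | nil => simp [PySem.Chars.splitOn.go, pvLines]
      | cons c t =>
          have hlen : t.length ≤ fuel := by simpa using h
          have hprefix : (['\n'] : List Char).isPrefixOf (c :: t) = (c == '\n') := by
            simp [List.isPrefixOf, eq_comm]
          simp only [PySem.Chars.splitOn.go, hprefix]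
          by_cases hc : c = '\n'
          · subst hc
            simp only [beq_self_eq_true, if_true]
            rw [show List.drop (['\n'] : List Char).length ('\n' :: t) = t from rfl]
            rw [ih t [] _ hlen]
            simp [pvLines]
            cases pvLines t <;> simp [List.modifyHead]
          · simp only [show (c == '\n') = false from by simp [hc], Bool.false_eq_true, if_false]
            rw [ih t (c :: cur) acc hlen]
            simp only [pvLines, if_neg hc]
            rcases hne : pvLines t with _ | ⟨l0, rest⟩
            · exact absurd hne (pvLines_ne_nil t)
            · simp [List.modifyHead]

theorem pvSplitOn_eq (s : List Char) : PySem.Chars.splitOn s ['\n'] = pvLines s := by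
  rw [show PySem.Chars.splitOn s ['\n'] = PySem.Chars.splitOn.go ['\n'] (s.length + 1) s [] [] from rfl]
  rw [pvSplitOn_go_eq _ _ _ _ (by omega)]
  cases hne : pvLines s with
  | nil => exact absurd hne (pvLines_ne_nil s)
  | cons l0 rest => simp [List.modifyHead]

theorem pvJoin_cons (l : List Char) (ls : List (List Char)) (h : ls ≠ []) :
    PySem.Chars.join ['\n'] (l :: ls) = l ++ '\n' :: PySem.Chars.join ['\n'] ls := by
  cases ls with
  | nil => exact absurd rfl h
  | cons m ms => rw [PySem.Chars.join_cons_cons]; simp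

theorem pvJoin_pvLines (s : List Char) : PySem.Chars.join ['\n'] (pvLines s) = s := by
  induction s with
  | nil => simp [pvLines, PySem.Chars.join_singleton]
  | cons c t ih =>
      simp only [pvLines]
      by_cases hc : c = '\n'
      · subst hc
        rw [if_pos rfl, pvJoin_cons _ _ (pvLines_ne_nil t)]
        simp [ih]
      · rw [if_neg hc]
        rcases hne : pvLines t with _ | ⟨l0, rest⟩
        · exact absurd hne (pvLines_ne_nil t)
        · rw [hne] at ih
          simp only [List.modifyHead]
          cases rest with
          | nil =>
              simp only [PySem.Chars.join_singleton] at ih ⊢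
              simp [ih]
          | cons m ms =>
              rw [PySem.Chars.join_cons_cons] at ih
              rw [PySem.Chars.join_cons_cons]
              simp_all

-- head-line match: a newline-free prefix of s is a prefix of s's first line
theorem pvHead_match (p s : List Char) (hp : '\n' ∉ p) :
    p.isPrefixOf s = p.isPrefixOf (pvLines s).headI := by
  induction s generalizing p with
  | nil => simp [pvLines]
  | cons c t ih =>
      simp only [pvLines]
      by_cases hc : c = '\n'
      · subst hc
        simp only [List.headI]
        cases p with
        | nil => simp [List.isPrefixOf]
        | cons q qs =>
            have hq : q ≠ '\n' := fun h => hp (h ▸ List.mem_cons_self)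
            simp [List.isPrefixOf, hq]
      · rw [if_neg hc]
        rcases hne : pvLines t with _ | ⟨l0, rest⟩
        · exact absurd hne (pvLines_ne_nil t)
        · simp only [List.modifyHead, List.headI]
          cases p with
          | nil => simp [List.isPrefixOf]
          | cons q qs =>
              have hqs : '\n' ∉ qs := fun h => hp (List.mem_cons_of_mem _ h)
              have := ih qs hqs
              rw [hne] at this
              simp only [List.headI] at this
              simp [List.isPrefixOf, this]

theorem pvGo_zero (s sub : List Char) :
    PySem.Chars.rfind.go s sub 0 = if sub.isPrefixOf s then 0 else -1 := by
  simp [PySem.Chars.rfind.go]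

theorem pvGo_succ (s sub : List Char) (j : Nat) :
    PySem.Chars.rfind.go s sub (j+1)
      = if sub.isPrefixOf (s.drop (j+1)) then ((j:Int)+1) else PySem.Chars.rfind.go s sub j := by
  simp [PySem.Chars.rfind.go]

theorem pvGo_shift (c : Char) (s sub : List Char) (k : Nat) :
    PySem.Chars.rfind.go (c :: s) sub (k+1)
      = if PySem.Chars.rfind.go s sub k = -1
        then (if sub.isPrefixOf (c :: s) then 0 else -1)
        else PySem.Chars.rfind.go s sub k + 1 := by
  induction k with
  | zero =>
      rw [pvGo_succ, pvGo_zero, pvGo_zero]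
      simp only [List.drop_succ_cons, List.drop_zero]
      split_ifs <;> simp_all
  | succ k ih =>
      rw [pvGo_succ (c :: s) sub (k+1)]
      rw [pvGo_succ s sub k]
      simp only [List.drop_succ_cons]
      by_cases hpre : sub.isPrefixOf (s.drop (k+1)) = true
      · rw [if_pos hpre, if_pos hpre]
        rw [if_neg (by omega)]
        omega
      · rw [if_neg hpre, if_neg hpre, ih]

theorem pvRfind_nil (sub : List Char) :
    PySem.Chars.rfind [] sub = if sub.isPrefixOf [] then 0 else -1 := by
  simp [PySem.Chars.rfind, pvGo_zero]

theorem pvRfind_cons (c : Char) (s sub : List Char) :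
    PySem.Chars.rfind (c :: s) sub
      = if PySem.Chars.rfind s sub = -1
        then (if sub.isPrefixOf (c :: s) then 0 else -1)
        else PySem.Chars.rfind s sub + 1 := by
  rw [show PySem.Chars.rfind (c :: s) sub = PySem.Chars.rfind.go (c :: s) sub (s.length + 1) from rfl]
  rw [pvGo_shift]
  rfl

theorem pvNeg_one_le_rfind (s sub : List Char) : -1 ≤ PySem.Chars.rfind s sub := by
  induction s with
  | nil => rw [pvRfind_nil]; split_ifs <;> omega
  | cons c t ih => rw [pvRfind_cons]; split_ifs <;> omega

theorem pvTakeInclC_singleton (p l : List Char) : pvTakeInclC p [l] = [l] := by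
  simp only [pvTakeInclC]
  split_ifs <;> rfl

-- A's kept lines, seen from the front: drop the head line when a later line matches
theorem pvR_cons (p : List Char) (l : List Char) (ls : List (List Char)) :
    (pvTakeInclC p ((l :: ls).reverse)).reverse
      = if ls.any (fun x => p.isPrefixOf x) then (pvTakeInclC p ls.reverse).reverse else l :: ls := by
  rw [show (l :: ls).reverse = ls.reverse ++ [l] from by simp]
  rw [pvTakeInclC_append]
  rw [show ls.reverse.any (fun x => p.isPrefixOf x) = ls.any (fun x => p.isPrefixOf x) from by simp]
  split_ifs with h
  · rfl
  · rw [pvTakeInclC_singleton]; simp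

-- main induction: A's kept line suffix, joined, is B's character suffix
theorem pvMainGH (pref : List Char) (hp : '\n' ∉ pref) (s : List Char) :
    (PySem.Chars.join ['\n'] ((pvTakeInclC pref (pvLines s).reverse).reverse)
        = (if PySem.Chars.rfind s ('\n' :: pref) = -1 then s
           else s.drop (PySem.Chars.rfind s ('\n' :: pref) + 1).toNat))
    ∧ (PySem.Chars.rfind s ('\n' :: pref) = -1
        ↔ ((pvLines s).tail.any (fun l => pref.isPrefixOf l)) = false) := by
  induction s with
  | nil =>
      constructor
      · rw [pvRfind_nil]
        simp [pvLines, pvTakeInclC_singleton, PySem.Chars.join_singleton, List.isPrefixOf]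
      · rw [pvRfind_nil]
        simp [pvLines, List.isPrefixOf]
  | cons c t ih =>
      obtain ⟨ihG, ihH⟩ := ih
      rcases hne : pvLines t with _ | ⟨l0, tl⟩
      · exact absurd hne (pvLines_ne_nil t)
      have hhead : pref.isPrefixOf t = pref.isPrefixOf l0 := by
        rw [pvHead_match pref t hp, hne]; rfl
      by_cases hp' : PySem.Chars.rfind t ('\n' :: pref) = -1
      · -- no tail-line of t matches
        have htl : tl.any (fun l => pref.isPrefixOf l) = false := by
          have := ihH.mp hp'
          rwa [hne] at this
        by_cases hc : c = '\n'
        · subst hc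
          rw [show pvLines ('\n' :: t) = [] :: pvLines t from by simp [pvLines]]
          rw [pvRfind_cons, if_pos hp']
          rw [show ('\n' :: pref).isPrefixOf ('\n' :: t) = pref.isPrefixOf t from by
            simp [List.isPrefixOf]]
          by_cases hm : pref.isPrefixOf t = true
          · -- first line of t matches: A keeps t's kept suffix = t, B drops the newline
            have hany : (pvLines t).any (fun l => pref.isPrefixOf l) = true := by
              rw [hne]; simp [← hhead, hm]
            rw [if_pos hm]
            constructor
            · rw [pvR_cons, hany, if_pos rfl]
              rw [ihG, if_pos hp']
              norm_num
            · rw [hne]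
              simp [← hhead, hm]
          · have hany : (pvLines t).any (fun l => pref.isPrefixOf l) = false := by
              rw [hne]; simp [← hhead, hm, htl]
            rw [if_neg hm]
            constructor
            · rw [pvR_cons, hany]
              simp only [if_false, Bool.false_eq_true]
              rw [if_pos trivial, pvJoin_cons _ _ (pvLines_ne_nil t), pvJoin_pvLines]
              simp
            · rw [hne]
              simp [← hhead, hm, htl]
        · rw [show pvLines (c :: t) = (c :: l0) :: tl from by simp [pvLines, hne, if_neg hc, List.modifyHead]]
          rw [pvRfind_cons, if_pos hp']
          rw [show ('\n' :: pref).isPrefixOf (c :: t) = false from by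
            simp [List.isPrefixOf]; intro h; exact absurd h.symm hc]
          simp only [Bool.false_eq_true, if_false]
          constructor
          · rw [if_pos trivial, pvR_cons, htl]
            simp only [Bool.false_eq_true, if_false]
            rw [show ((c :: l0) :: tl) = pvLines (c :: t) from by simp [pvLines, hne, if_neg hc, List.modifyHead]]
            rw [pvJoin_pvLines]
          · simp [htl]
      · -- some tail-line of t matches: both sides return t's answer
        have hp0 : 0 ≤ PySem.Chars.rfind t ('\n' :: pref) := by
          have := pvNeg_one_le_rfind t ('\n' :: pref); omega
        have htl : tl.any (fun l => pref.isPrefixOf l) = true := by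
          have := ihH; rw [hne] at this
          by_cases h : tl.any (fun l => pref.isPrefixOf l) = true
          · exact h
          · exact absurd (this.mpr (by simpa using h)) hp'
        have hGt : PySem.Chars.join ['\n'] ((pvTakeInclC pref (pvLines t).reverse).reverse)
            = t.drop (PySem.Chars.rfind t ('\n' :: pref) + 1).toNat := by
          rw [ihG, if_neg hp']
        by_cases hc : c = '\n'
        · subst hc
          rw [show pvLines ('\n' :: t) = [] :: pvLines t from by simp [pvLines]]
          rw [pvRfind_cons, if_neg hp']
          constructor
          · rw [if_neg (by omega), pvR_cons]
            rw [show (pvLines t).any (fun l => pref.isPrefixOf l) = true from by rw [hne]; simp [htl]]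
            rw [if_pos rfl, hGt]
            rw [show (PySem.Chars.rfind t ('\n' :: pref) + 1 + 1).toNat
                = (PySem.Chars.rfind t ('\n' :: pref) + 1).toNat + 1 from by omega]
            rfl
          · constructor
            · intro h; omega
            · intro h; rw [hne] at h; simp [htl] at h
        · rw [show pvLines (c :: t) = (c :: l0) :: tl from by simp [pvLines, hne, if_neg hc, List.modifyHead]]
          rw [pvRfind_cons, if_neg hp']
          constructor
          · rw [if_neg (by omega), pvR_cons, htl, if_pos rfl]
            rw [show tl = (pvLines t).tail from by rw [hne]; rfl]
            rw [show (pvLines t).tail = ((l0 :: tl) : List (List Char)).tail from by rw [hne]]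
            rw [show ((l0 :: tl) : List (List Char)).tail = tl from rfl]
            have : (pvTakeInclC pref tl.reverse).reverse
                = (pvTakeInclC pref (pvLines t).reverse).reverse := by
              rw [hne, pvR_cons, htl, if_pos rfl]
            rw [this, hGt]
            rw [show (PySem.Chars.rfind t ('\n' :: pref) + 1 + 1).toNat
                = (PySem.Chars.rfind t ('\n' :: pref) + 1).toNat + 1 from by omega]
            rfl
          · constructor
            · intro h; omega
            · intro h; simp [htl] at h

-- ===== VERDICT (by name: the statement is the Claim_ definition above) =====
theorem pvTakeInclC_no_match (p : List Char) (ls : List (List Char))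
    (h : ∀ l ∈ ls, p.isPrefixOf l = false) : pvTakeInclC p ls = ls := by
  induction ls with
  | nil => rfl
  | cons l ls ih =>
      simp only [pvTakeInclC]
      rw [if_neg (by simp [h l List.mem_cons_self]), ih fun x hx => h x (List.mem_cons_of_mem _ hx)]

theorem pvLines_no_newline (s : List Char) : ∀ l ∈ pvLines s, '\n' ∉ l := by
  induction s with
  | nil => simp [pvLines]
  | cons c t ih =>
      simp only [pvLines]
      by_cases hc : c = '\n'
      · subst hc
        rw [if_pos rfl]
        intro l hl
        rcases List.mem_cons.mp hl with h | h
        · simp [h]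
        · exact ih l h
      · rw [if_neg hc]
        rcases hne : pvLines t with _ | ⟨l0, tl⟩
        · exact absurd hne (pvLines_ne_nil t)
        · rw [hne] at ih
          simp only [List.modifyHead]
          intro l hl
          rcases List.mem_cons.mp hl with h | h
          · subst h
            intro hmem
            rcases List.mem_cons.mp hmem with h | h
            · exact hc h.symm
            · exact ih l0 List.mem_cons_self h
          · exact ih l (List.mem_cons_of_mem _ h)

theorem pvRfind_eq_neg_one_iff (s sub : List Char) :
    PySem.Chars.rfind s sub = -1 ↔ ∀ j, ¬ sub <+: s.drop j := by
  induction s with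
  | nil =>
      rw [pvRfind_nil]
      constructor
      · intro h j
        simp only [List.drop_nil]
        intro hpre
        rw [if_pos (List.isPrefixOf_iff_prefix.mpr hpre)] at h
        omega
      · intro h
        rw [if_neg (by simpa [List.isPrefixOf_iff_prefix] using h 0)]
  | cons c t ih =>
      rw [pvRfind_cons]
      constructor
      · intro h j
        by_cases hr : PySem.Chars.rfind t sub = -1
        · rw [if_pos hr] at h
          cases j with
          | zero =>
              simp only [List.drop_zero]
              intro hpre
              rw [if_pos (List.isPrefixOf_iff_prefix.mpr hpre)] at h
              omega
          | succ j =>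
              rw [List.drop_succ_cons]
              exact (ih.mp hr) j
        · rw [if_neg hr] at h
          have := pvNeg_one_le_rfind t sub
          omega
      · intro h
        have hr : PySem.Chars.rfind t sub = -1 :=
          ih.mpr fun j => by simpa [List.drop_succ_cons] using h (j+1)
        rw [if_pos hr, if_neg (by simpa [List.isPrefixOf_iff_prefix] using h 0)]

theorem pvJoin_nil_three (a b c : String) :
    (PySem.Str.join "" [a, b, c]).toList = a.toList ++ b.toList ++ c.toList := by
  rw [PySem.Str.toList_join]
  simp only [List.map_cons, List.map_nil]
  rw [PySem.Chars.join_cons_cons, PySem.Chars.join_cons_cons, PySem.Chars.join_singleton]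
  simp [show ("" : String).toList = [] from by decide]

theorem extract_task_fn_spec : Claim_equal_extract_task_fn := by
  intro r f _ hpre
  unfold Spec_extract_task_fn
  apply String.toList_inj.mp
  -- names for the two f-string literals, on code points
  set prefC : List Char := (PySem.Str.join "" ["def ", f, "("]).toList with hprefC
  have hmark : (PySem.Str.join "" ["\ndef ", f, "("]).toList = '\n' :: prefC := by
    rw [pvJoin_nil_three, hprefC, pvJoin_nil_three]
    rw [show ("\ndef " : String).toList = '\n' :: ("def " : String).toList from by decide]
    simp
  -- the split of A: some list of lines whose code points are pvLines r.toList
  have hsp := PySem.Str.split?_map r "\n"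
  rw [show ("\n" : String).toList = ['\n'] from by decide] at hsp
  rw [show PySem.Chars.split? r.toList ['\n'] = some (PySem.Chars.splitOn r.toList ['\n']) from by
    simp [PySem.Chars.split?]] at hsp
  rcases hxs : PySem.Str.split? r "\n" with _ | xs
  · rw [hxs] at hsp; simp at hsp
  rw [hxs] at hsp
  simp only [Option.map_some, Option.some.injEq] at hsp
  rw [pvSplitOn_eq] at hsp
  -- A's output, on code points
  have hA : (extract_task_fn r f).toList
      = PySem.Chars.join ['\n'] ((pvTakeInclC prefC (pvLines r.toList).reverse).reverse) := by
    unfold extract_task_fn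
    rw [hxs]
    simp only [Option.getD_some]
    rw [PySem.Str.toList_join, pvLoopA_eq, List.nil_append]
    rw [show ("\n" : String).toList = ['\n'] from by decide]
    rw [List.map_reverse, pvTakeIncl_map, ← hprefC, List.map_reverse, hsp]
  rw [hA]
  by_cases hf : '\n' ∈ f.toList
  · -- fn_name contains a newline: Pre_ guarantees the marker does not occur in result_str,
    -- so A keeps every line and B finds nothing — both return the whole string
    have hin : PySem.Str.isIn (PySem.Str.join "" ["\ndef ", f, "("]) r = false := by
      rcases hpre with h | h
      · exact absurd hf h
      · exact h
    have hneg : PySem.Chars.rfind r.toList ('\n' :: prefC) = -1 := by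
      rw [pvRfind_eq_neg_one_iff]
      intro j hpre'
      rw [show ('\n' :: prefC) = (PySem.Str.join "" ["\ndef ", f, "("]).toList from hmark.symm] at hpre'
      have := (PySem.Chars.exists_prefix_drop_iff_isIn _ _).mp ⟨j, hpre'⟩
      rw [← PySem.Str.isIn_eq] at this
      rw [hin] at this
      exact absurd this (by simp)
    have hnlp : '\n' ∈ prefC := by
      rw [hprefC, pvJoin_nil_three]
      exact List.mem_append.mpr (Or.inl (List.mem_append.mpr (Or.inr hf)))
    have hnom : ∀ l ∈ (pvLines r.toList).reverse, prefC.isPrefixOf l = false := by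
      intro l hl
      rw [List.mem_reverse] at hl
      by_contra hmatch
      simp only [Bool.not_eq_false, List.isPrefixOf_iff_prefix] at hmatch
      exact pvLines_no_newline r.toList l hl (hmatch.mem hnlp)
    rw [pvTakeInclC_no_match _ _ hnom, List.reverse_reverse, pvJoin_pvLines]
    unfold extract_task_fn_alt
    rw [PySem.Str.rfind_eq, hmark, if_pos hneg]
  · -- fn_name has no newline: the main induction applies
    have hnl : '\n' ∉ prefC := by
      rw [hprefC, pvJoin_nil_three]
      intro hmem
      rcases List.mem_append.mp hmem with hmem | hmem
      · rcases List.mem_append.mp hmem with hmem | hmem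
        · exact absurd hmem (by decide)
        · exact hf hmem
      · exact absurd hmem (by decide)
    obtain ⟨hG, -⟩ := pvMainGH prefC hnl r.toList
    rw [hG]
    unfold extract_task_fn_alt
    rw [PySem.Str.rfind_eq, hmark]
    by_cases hneg : PySem.Chars.rfind r.toList ('\n' :: prefC) = -1
    · rw [if_pos hneg, if_pos hneg]
    · rw [if_neg hneg, if_neg hneg]
      rw [PySem.Str.toList_slice, PySem.Chars.slice_eq_listSlice]
      rw [PySem.List.slice_from (a := PySem.Chars.rfind r.toList ('\n' :: prefC) + 1) _ (by have := pvNeg_one_le_rfind r.toList ('\n' :: prefC); omega)]
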